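-- pv_equiv track=rewrite | github.com/Diego999/Risk-Analysis-using-Topic-Models-on-Annual-Reports | parser_utils.py | remove_last_ref_next_item
-- ===== SOURCE A (Python) =====
-- def remove_above(v, _list):
--     return [x for x in _list if x < v]
--
-- def remove_last_ref_next_item(lists):
--     elems = [x for x in reversed(range(0, len(lists)))]
--     for idx1, i in enumerate(elems):
--         if len(lists[i]) > 0:
--             max_ref = max(lists[i])
--             for j in range(idx1 + 1, len(elems)):
--                 lists[elems[j]] = remove_above(max_ref, lists[elems[j]])
--     return lists
-- ===== SOURCE B (Python) =====
-- def remove_last_ref_next_item(lists):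
--     # Single back-to-front pass with a running threshold (the min of the maxima
--     # seen so far, which is just the last nonempty kept list's max).
--     # Note: returns a fresh list; unlike A it does not mutate `lists` in place.
--     out = []
--     t = None
--     for lst in reversed(lists):
--         kept = lst if t is None else [x for x in lst if x < t]
--         if kept:
--             t = max(kept)
--         out.append(kept)
--     out.reverse()
--     return out
-- ===== Notes on version B (the rewrite author's own statement) =====
-- stated objective: faster
-- what changed: A re-filters every earlier list once per non-empty later list (nested loops over the list of lists); B makes a single back-to-front pass carrying a running threshold (the max of the last non-empty kept list) and filters each list exactly once.
import Mathlib
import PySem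

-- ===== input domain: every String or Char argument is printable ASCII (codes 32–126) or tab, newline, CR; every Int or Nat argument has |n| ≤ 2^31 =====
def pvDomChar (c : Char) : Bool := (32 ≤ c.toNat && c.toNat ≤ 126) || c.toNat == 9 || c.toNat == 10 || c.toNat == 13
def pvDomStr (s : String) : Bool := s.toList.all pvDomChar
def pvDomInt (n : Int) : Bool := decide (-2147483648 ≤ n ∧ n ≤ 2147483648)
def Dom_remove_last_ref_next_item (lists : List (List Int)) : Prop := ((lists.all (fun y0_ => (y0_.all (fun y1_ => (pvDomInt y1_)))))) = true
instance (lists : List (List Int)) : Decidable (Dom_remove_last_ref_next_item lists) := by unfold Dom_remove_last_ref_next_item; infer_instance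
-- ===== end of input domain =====

-- B replaces A's quadratic pass (each nonempty list re-filters every earlier list) by one
-- back-to-front pass carrying a running threshold; equivalence is about the RETURN value only
-- (the Python A mutates its argument in place, B builds a fresh list).

-- ===== PORT A =====
def remove_above (v : Int) (_list : List Int) : List Int :=
  _list.filter (fun x => x < v)

def remove_last_ref_next_item (lists : List (List Int)) : List (List Int) :=
  let elems := (PySem.List.pyRange 0 (PySem.List.len lists)).reverse
  (PySem.List.enumerate elems).foldl
    (fun acc p =>
      if (PySem.List.pyGetD acc p.2 []).length > 0 then
        let max_ref := (PySem.List.max? (PySem.List.pyGetD acc p.2 []) (fun x => x)).getD 0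
        (PySem.List.pyRange (p.1 + 1) (PySem.List.len elems)).foldl
          (fun acc2 j =>
            PySem.List.pySetD acc2 (PySem.List.pyGetD elems j 0)
              (remove_above max_ref (PySem.List.pyGetD acc2 (PySem.List.pyGetD elems j 0) [])))
          acc
      else acc)
    lists

-- ===== PORT B =====
def remove_last_ref_next_item_alt (lists : List (List Int)) : List (List Int) :=
  let r := lists.reverse.foldl
    (fun (acc : List (List Int) × Option Int) lst =>
      let kept := match acc.2 with
        | none => lst
        | some t => lst.filter (fun x => x < t)
      let t' := if kept ≠ [] then some ((PySem.List.max? kept (fun x => x)).getD 0) else acc.2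
      (acc.1 ++ [kept], t'))
    ([], none)
  r.1.reverse

-- ===== PRECONDITION & SPEC =====
def Spec_remove_last_ref_next_item (lists : List (List Int)) (out : List (List Int)) : Prop := out = remove_last_ref_next_item_alt lists
instance (lists : List (List Int)) (out : List (List Int)) : Decidable (Spec_remove_last_ref_next_item lists out) := by unfold Spec_remove_last_ref_next_item; infer_instance

-- ===== CLAIM (what is proved, stated in full; the proofs are below) =====
def Claim_equal_remove_last_ref_next_item : Prop := ∀ (lists : List (List Int)), Dom_remove_last_ref_next_item lists → Spec_remove_last_ref_next_item lists (remove_last_ref_next_item lists)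

-- ===== LEMMAS AND PROOFS =====

-- proof-only helpers -------------------------------------------------------

def maxD (l : List Int) : Int := (PySem.List.max? l (fun x => x)).getD 0

def filtOpt (t : Option Int) (l : List Int) : List Int :=
  match t with
  | none => l
  | some v => l.filter (fun x => x < v)

def updOpt (t : Option Int) (kept : List Int) : Option Int :=
  if kept ≠ [] then some (maxD kept) else t

-- processes the reversed list of lists, threading the lazy threshold (B's algorithm)
def rproc : List (List Int) → Option Int → List (List Int)
  | [], _ => []
  | l :: rs, t => filtOpt t l :: rproc rs (updOpt t (filtOpt t l))

-- eager form: at each step filter all remaining (earlier) lists at once (A's algorithm, on the reversed list)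
def aspec : List (List Int) → List (List Int)
  | [] => []
  | l :: rs => l :: aspec (if l ≠ [] then rs.map (remove_above (maxD l)) else rs)
  termination_by r => r.length
  decreasing_by split <;> simp

-- one step of A's outer loop at index i: filter the first i entries by the max of entry i
def gstep (acc : List (List Int)) (i : Nat) : List (List Int) :=
  if (acc.getD i []).length > 0 then
    (acc.take i).map (remove_above (maxD (acc.getD i []))) ++ acc.drop i
  else acc

def gfun (ls : List (List Int)) : List (List Int) :=
  ((List.range ls.length).reverse).foldl gstep ls

def setstep (m : Int) (acc : List (List Int)) (k : Nat) : List (List Int) :=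
  acc.set k (remove_above m (acc.getD k []))

def ominOpt : Option Int → Int → Int
  | none, m => m
  | some v, m => min v m

-- generic foldl congruence under an invariant
lemma foldl_inv {α σ : Type} (P : σ → Prop) (f g : σ → α → σ) :
    ∀ (L : List α) (s : σ), P s → (∀ s a, P s → a ∈ L → f s a = g s a) →
      (∀ s a, P s → P (g s a)) → L.foldl f s = L.foldl g s := by
  intro L
  induction L with
  | nil => intros; rfl
  | cons a L ih =>
    intro s hs hfg hP
    simp only [List.foldl_cons]
    rw [hfg s a hs (by simp)]
    exact ih _ (hP s a hs) (fun s' a' hs' ha' => hfg s' a' hs' (by simp [ha'])) hP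

lemma pySetD_natCast (xs : List (List Int)) (n : Nat) (v : List Int) (h : n < xs.length) :
    PySem.List.pySetD xs (↑n) v = xs.set n v := by
  simp [PySem.List.pySetD, PySem.List.pySet?_natCast xs n v h]

lemma gstep_length (acc : List (List Int)) (i : Nat) : (gstep acc i).length = acc.length := by
  unfold gstep
  split
  · simp [List.length_take, List.length_drop]; omega
  · rfl

lemma range_reverse_map (i : Nat) :
    (List.range i).reverse = (List.range i).map (fun t => i - 1 - t) := by
  apply List.ext_getElem
  · simp
  · intro k h1 h2
    simp only [List.getElem_reverse, List.getElem_range, List.getElem_map,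
      List.length_range] at *

lemma setfold (m : Int) : ∀ (i : Nat) (acc : List (List Int)), i ≤ acc.length →
    ((List.range i).reverse).foldl (setstep m) acc
      = (acc.take i).map (remove_above m) ++ acc.drop i := by
  intro i
  induction i with
  | zero => intro acc h; simp
  | succ i ih =>
    intro acc h
    have hi : i < acc.length := by omega
    rw [List.range_succ, List.reverse_append, List.reverse_singleton,
      List.singleton_append, List.foldl_cons]
    rw [ih (setstep m acc i) (by simp [setstep]; omega)]
    have hset_take : (setstep m acc i).take i = acc.take i := by
      rw [setstep, List.take_set]
      exact List.set_eq_of_length_le (by simp)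
    have hset_drop : (setstep m acc i).drop i
        = remove_above m (acc.getD i []) :: acc.drop (i + 1) := by
      rw [setstep, List.drop_set]
      rw [if_neg (lt_irrefl i), Nat.sub_self, List.drop_eq_getElem_cons hi, List.set_cons_zero]
    rw [hset_take, hset_drop]
    have htake : acc.take (i + 1) = acc.take i ++ [acc.getD i []] := by
      rw [List.take_add_one, List.getElem?_eq_getElem hi, List.getD_eq_getElem _ _ hi]
      rfl
    rw [htake]
    simp

def elemsOf (n : Nat) : List Int := (PySem.List.pyRange 0 (↑n)).reverse

lemma elemsOf_length (n : Nat) : (elemsOf n).length = n := by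
  simp [elemsOf, PySem.List.length_pyRange_one]

lemma elems_get (n k : Nat) (hk : k < n) :
    PySem.List.pyGetD (elemsOf n) (↑k) 0 = ((n - 1 - k : Nat) : Int) := by
  have hlen : (elemsOf n).length = n := elemsOf_length n
  rw [PySem.List.pyGetD_natCast, List.getD_eq_getElem _ _ (by omega)]
  simp only [elemsOf, List.getElem_reverse, PySem.List.length_pyRange_one]
  rw [PySem.List.getElem_pyRange_one]
  have : ((0:Int) - 0).toNat = 0 := rfl
  simp only at *
  omega

lemma portA_unfold (ls : List (List Int)) :
    remove_last_ref_next_item ls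
      = (PySem.List.enumerate (elemsOf ls.length)).foldl
          (fun acc p =>
            if (PySem.List.pyGetD acc p.2 []).length > 0 then
              (PySem.List.pyRange (p.1 + 1) (↑ls.length)).foldl
                (fun acc2 j =>
                  PySem.List.pySetD acc2 (PySem.List.pyGetD (elemsOf ls.length) j 0)
                    (remove_above ((PySem.List.max? (PySem.List.pyGetD acc p.2 []) (fun x => x)).getD 0)
                      (PySem.List.pyGetD acc2 (PySem.List.pyGetD (elemsOf ls.length) j 0) [])))
                acc
            else acc)
          ls := by
  simp only [remove_last_ref_next_item, elemsOf, PySem.List.len_eq, List.length_reverse,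
    PySem.List.length_pyRange_one, Int.sub_zero, Int.toNat_natCast]

lemma stepA_eq (n : Nat) (acc : List (List Int)) (k : Nat) (hlen : acc.length = n) (hk : k < n) :
    (if (PySem.List.pyGetD acc (PySem.List.pyGetD (elemsOf n) (↑k) 0) []).length > 0 then
        (PySem.List.pyRange ((↑k : Int) + 1) (↑n)).foldl
          (fun acc2 j =>
            PySem.List.pySetD acc2 (PySem.List.pyGetD (elemsOf n) j 0)
              (remove_above ((PySem.List.max? (PySem.List.pyGetD acc (PySem.List.pyGetD (elemsOf n) (↑k) 0) []) (fun x => x)).getD 0)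
                (PySem.List.pyGetD acc2 (PySem.List.pyGetD (elemsOf n) j 0) [])))
          acc
      else acc)
      = gstep acc (n - 1 - k) := by
  rw [elems_get n k hk, PySem.List.pyGetD_natCast acc (n - 1 - k) []]
  simp only [gstep, maxD]
  split
  · rw [PySem.List.pyRange_one, List.foldl_map]
    have hcnt : ((n : Int) - ((k : Int) + 1)).toNat = n - 1 - k := by omega
    rw [hcnt]
    rw [foldl_inv (fun acc2 => acc2.length = n) _
      (fun acc2 t => setstep ((PySem.List.max? (acc.getD (n - 1 - k) []) (fun x => x)).getD 0) acc2 (n - 1 - k - 1 - t))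
      (List.range (n - 1 - k)) acc hlen ?_ ?_]
    · rw [show (List.range (n - 1 - k)).foldl
          (fun acc2 t => setstep ((PySem.List.max? (acc.getD (n - 1 - k) []) (fun x => x)).getD 0) acc2 (n - 1 - k - 1 - t)) acc
          = ((List.range (n - 1 - k)).map (fun t => n - 1 - k - 1 - t)).foldl
              (setstep ((PySem.List.max? (acc.getD (n - 1 - k) []) (fun x => x)).getD 0)) acc
        from (List.foldl_map).symm]
      rw [← range_reverse_map, setfold _ (n - 1 - k) acc (by omega)]
    · intro s a hs ha
      have hai : a < n - 1 - k := List.mem_range.mp ha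
      have hcast : ((k : Int) + 1 + (a : Int)) = ((k + 1 + a : Nat) : Int) := by push_cast; ring
      rw [hcast, elems_get n (k + 1 + a) (by omega)]
      have hidx : n - 1 - (k + 1 + a) = n - 1 - k - 1 - a := by omega
      rw [hidx, PySem.List.pyGetD_natCast s (n - 1 - k - 1 - a) [],
        pySetD_natCast s (n - 1 - k - 1 - a) _ (by omega)]
      rfl
    · intro s a hs
      simp [setstep, hs]
  · rfl

lemma portA_eq_gfun (ls : List (List Int)) : remove_last_ref_next_item ls = gfun ls := by
  rw [portA_unfold, PySem.List.enumerate_eq_map_pyRange _ 0, List.foldl_map,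
    PySem.List.len_eq, elemsOf_length, PySem.List.pyRange_zero_nat, List.foldl_map]
  rw [foldl_inv (fun acc => acc.length = ls.length) _
    (fun acc k => gstep acc (ls.length - 1 - k)) (List.range ls.length) ls rfl
    (fun s a hs ha => stepA_eq ls.length s a hs (List.mem_range.mp ha))
    (fun s a hs => by show (gstep s _).length = ls.length; rw [gstep_length]; exact hs)]
  rw [show (List.range ls.length).foldl (fun acc k => gstep acc (ls.length - 1 - k)) ls
      = ((List.range ls.length).map (fun k => ls.length - 1 - k)).foldl gstep ls
    from (List.foldl_map).symm]
  rw [← range_reverse_map]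
  rfl

lemma appendFold (l : List Int) : ∀ (js : List Nat) (ys : List (List Int)),
    (∀ j ∈ js, j < ys.length) →
    js.foldl gstep (ys ++ [l]) = js.foldl gstep ys ++ [l] := by
  intro js
  induction js with
  | nil => intros; rfl
  | cons j js ih =>
    intro ys hjs
    have hj : j < ys.length := hjs j (by simp)
    have hstep : gstep (ys ++ [l]) j = gstep ys j ++ [l] := by
      unfold gstep
      have hget : (ys ++ [l]).getD j [] = ys.getD j [] := by
        rw [List.getD_eq_getElem _ _ (by simp; omega), List.getD_eq_getElem _ _ hj,
          List.getElem_append_left]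
      rw [hget, List.take_append_of_le_length (le_of_lt hj),
        List.drop_append_of_le_length (le_of_lt hj)]
      split
      · rw [List.append_assoc]
      · rfl
    simp only [List.foldl_cons, hstep]
    exact ih (gstep ys j) (fun j' hj' => by rw [gstep_length]; exact hjs j' (by simp [hj']))

lemma gfun_eq_aux : ∀ (N : Nat) (ls : List (List Int)), ls.length ≤ N →
    gfun ls = (aspec ls.reverse).reverse := by
  intro N
  induction N with
  | zero =>
    intro ls h
    have : ls = [] := List.eq_nil_of_length_eq_zero (by omega)
    subst this; simp [gfun, aspec]
  | succ N ih =>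
    intro ls h
    rcases List.eq_nil_or_concat ls with rfl | ⟨xs, l, rfl⟩
    · simp [gfun, aspec]
    · rw [List.concat_eq_append] at h ⊢
      have h1 : gfun (xs ++ [l]) = ((List.range xs.length).reverse).foldl gstep (gstep (xs ++ [l]) xs.length) := by
        unfold gfun
        simp only [List.length_append, List.length_cons, List.length_nil]
        rw [List.range_succ, List.reverse_append, List.reverse_singleton, List.singleton_append,
          List.foldl_cons]
      have hg : gstep (xs ++ [l]) xs.length
          = (if l ≠ [] then xs.map (remove_above (maxD l)) else xs) ++ [l] := by
        unfold gstep
        have hget : (xs ++ [l]).getD xs.length [] = l := by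
          rw [List.getD_eq_getElem _ _ (by simp), List.getElem_concat_length]
          rfl
        rw [hget, List.take_left, List.drop_left]
        split
        · rw [if_pos (by rename_i hh; exact List.ne_nil_of_length_pos hh)]
        · rw [if_neg (by rename_i hh; simp at hh; simp [hh])]
      set ys := if l ≠ [] then xs.map (remove_above (maxD l)) else xs with hys
      have hyslen : ys.length = xs.length := by rw [hys]; split <;> simp
      have h2 : ((List.range xs.length).reverse).foldl gstep (ys ++ [l])
          = ((List.range xs.length).reverse).foldl gstep ys ++ [l] :=
        appendFold l _ ys (by
          intro j hj
          rw [hyslen]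
          exact List.mem_range.mp (List.mem_reverse.mp hj))
      have h3 : ((List.range xs.length).reverse).foldl gstep ys = gfun ys := by
        unfold gfun; rw [hyslen]
      have h4 : gfun ys = (aspec ys.reverse).reverse := by
        apply ih
        rw [hyslen]
        simp at h
        omega
      have h5 : aspec ((xs ++ [l]).reverse) = l :: aspec ys.reverse := by
        rw [List.reverse_append, List.reverse_singleton, List.singleton_append, aspec]
        congr 1
        rw [hys]
        split
        · rw [List.map_reverse]
        · rfl
      rw [h1, hg, h2, h3, h4, h5]
      simp

lemma rproc_map (m : Int) : ∀ (r : List (List Int)) (t : Option Int),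
    rproc (r.map (remove_above m)) t = rproc r (some (ominOpt t m)) := by
  intro r
  induction r with
  | nil => intro t; simp [rproc]
  | cons l rs ih =>
    intro t
    have hk : filtOpt t (remove_above m l) = filtOpt (some (ominOpt t m)) l := by
      cases t with
      | none => rfl
      | some v =>
        show (List.filter (fun x => decide (x < m)) l).filter (fun x => decide (x < v))
            = l.filter (fun x => decide (x < min v m))
        rw [List.filter_filter]
        apply List.filter_congr
        intro x _
        simp only [lt_min_iff, Bool.decide_and]
    simp only [List.map_cons, rproc]
    rw [hk]
    by_cases hne : filtOpt (some (ominOpt t m)) l = []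
    · rw [hne]
      have hu1 : updOpt t [] = t := by simp [updOpt]
      have hu2 : updOpt (some (ominOpt t m)) [] = some (ominOpt t m) := by simp [updOpt]
      rw [hu1, hu2, ih]
    · have hmem : ∀ x ∈ filtOpt (some (ominOpt t m)) l, x < m := by
        intro x hx
        have hxf : x ∈ l.filter (fun x => decide (x < ominOpt t m)) := hx
        have := (List.mem_filter.mp hxf).2
        have hxo : x < ominOpt t m := by simpa using this
        have hle : ominOpt t m ≤ m := by cases t <;> simp [ominOpt]
        omega
      obtain ⟨mx, hmx⟩ : ∃ mx, PySem.List.max? (filtOpt (some (ominOpt t m)) l) (fun x => x) = some mx := by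
        cases hmo : PySem.List.max? (filtOpt (some (ominOpt t m)) l) (fun x => x) with
        | none => exact absurd ((PySem.List.max?_eq_none_iff _ _).mp hmo) hne
        | some mx => exact ⟨mx, rfl⟩
      have hlt : mx < m := hmem mx (PySem.List.max?_mem hmx)
      have hmaxd : maxD (filtOpt (some (ominOpt t m)) l) = mx := by simp [maxD, hmx]
      have hu1 : updOpt t (filtOpt (some (ominOpt t m)) l) = some mx := by
        simp [updOpt, hne, hmaxd]
      have hu2 : updOpt (some (ominOpt t m)) (filtOpt (some (ominOpt t m)) l) = some mx := by
        simp [updOpt, hne, hmaxd]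
      rw [hu1, hu2, ih]
      have : ominOpt (some mx) m = mx := by simp [ominOpt, min_eq_left (le_of_lt hlt)]
      rw [this]

lemma aspec_eq_aux : ∀ (N : Nat) (r : List (List Int)), r.length ≤ N →
    aspec r = rproc r none := by
  intro N
  induction N with
  | zero =>
    intro r h
    have : r = [] := List.eq_nil_of_length_eq_zero (by omega)
    subst this; simp [aspec, rproc]
  | succ N ih =>
    intro r h
    match r with
    | [] => simp [aspec, rproc]
    | l :: rs =>
      rw [aspec]
      by_cases hl : l = []
      · subst hl
        rw [if_neg (by simp)]
        rw [ih rs (by simp at h; omega)]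
        simp [rproc, filtOpt, updOpt]
      · rw [if_pos hl]
        rw [ih _ (by simp at h ⊢; omega), rproc_map]
        have h1 : rproc (l :: rs) none = l :: rproc rs (some (maxD l)) := by
          simp [rproc, filtOpt, updOpt, hl]
        rw [h1]
        rfl

lemma bfold : ∀ (r : List (List Int)) (out : List (List Int)) (t : Option Int),
    (r.foldl
      (fun (acc : List (List Int) × Option Int) lst =>
        let kept := match acc.2 with
          | none => lst
          | some t => lst.filter (fun x => x < t)
        let t' := if kept ≠ [] then some ((PySem.List.max? kept (fun x => x)).getD 0) else acc.2
        (acc.1 ++ [kept], t'))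
      (out, t)).1 = out ++ rproc r t := by
  intro r
  induction r with
  | nil => intro out t; simp [rproc]
  | cons l rs ih =>
    intro out t
    simp only [List.foldl_cons]
    rw [ih]
    have h1 : (match t with | none => l | some v => List.filter (fun x => decide (x < v)) l)
        = filtOpt t l := by cases t <;> rfl
    simp only [h1]
    rw [rproc]
    have h2 : (if filtOpt t l ≠ [] then some ((PySem.List.max? (filtOpt t l) (fun x => x)).getD 0) else t)
        = updOpt t (filtOpt t l) := rfl
    rw [h2, List.append_assoc]
    rfl

lemma portB_eq (ls : List (List Int)) :
    remove_last_ref_next_item_alt ls = (rproc ls.reverse none).reverse := by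
  simp only [remove_last_ref_next_item_alt]
  rw [bfold]
  simp

-- ===== VERDICT (by name: the statement is the Claim_ definition above) =====
theorem remove_last_ref_next_item_spec : Claim_equal_remove_last_ref_next_item := by
  intro lists _
  unfold Spec_remove_last_ref_next_item
  rw [portA_eq_gfun, portB_eq, gfun_eq_aux lists.length lists le_rfl,
    aspec_eq_aux lists.reverse.length lists.reverse le_rfl]
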